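-- pv_equiv track=rewrite | github.com/ohwwh/Personal_study | 알고리즘/라인 코테/키보드.py | solution
-- ===== SOURCE A (Python) =====
-- from itertools import combinations
--
-- def get_score(str, set):
--     isshift = 0
--     score = 0
--     if 'shift' in set:
--         isshift = 1
--     for i in str:
--         if i != ' ':
--             if i.isupper():
--                 if isshift == 0 or i.lower() not in set:
--                     return (0)
--             else:
--                 if i not in set:
--                     return (0)
--         if i.isupper() and i.lower() in set and isshift == 1:
--             score += 2
--         else:
--             score += 1
--     return score
--
-- def solution(sen, n):
--     isshift = 0
--     char_set = set()
--     comb = []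
--     for str in sen:
--         if str.islower() == False:
--             isshift = 1
--             str = str.lower()
--         char_set = char_set | set(str)
--     if isshift == 1:
--         char_set.add('shift')
--     char_set.remove(' ')
--     max = 0
--     for i in range(1, n + 1):
--         comb += list(combinations(char_set, i))
--     for st in comb:
--         s = 0
--         for str in sen:
--             s += get_score(str, st)
--         if s > max:
--             max = s
--     return max
-- ===== SOURCE B (Python) =====
-- from itertools import combinations
--
-- # Same key-pool construction and combination enumeration as A, but scoring is done
-- # via a precomputed per-sentence (requirement-set, value) table and a subset test
-- # instead of re-scanning every character of every sentence per combination.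
-- def solution(sen, n):
--     shift_needed = any(not s.islower() for s in sen)
--     keys = set()
--     for s in sen:
--         keys |= set(s.lower())
--     keys.discard(' ')
--     if shift_needed:
--         keys.add('shift')
--     table = []
--     for s in sen:
--         req = {c.lower() for c in s if c != ' '}
--         if any(c.isupper() for c in s):
--             req.add('shift')
--         table.append((req, len(s) + sum(c.isupper() for c in s)))
--     best = 0
--     for r in range(1, min(n, len(keys)) + 1):
--         for comb in combinations(keys, r):
--             cs = set(comb)
--             total = sum(v for req, v in table if req <= cs)
--             if total > best:
--                 best = total
--     return best
-- ===== Notes on version B (the rewrite author's own statement) =====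
-- stated objective: faster
-- what changed: B precomputes for each sentence a (requirement-set, value) pair once and scores each combination by a subset test over that table, instead of A's get_score re-scanning every character of every sentence for every combination.
import Mathlib
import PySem

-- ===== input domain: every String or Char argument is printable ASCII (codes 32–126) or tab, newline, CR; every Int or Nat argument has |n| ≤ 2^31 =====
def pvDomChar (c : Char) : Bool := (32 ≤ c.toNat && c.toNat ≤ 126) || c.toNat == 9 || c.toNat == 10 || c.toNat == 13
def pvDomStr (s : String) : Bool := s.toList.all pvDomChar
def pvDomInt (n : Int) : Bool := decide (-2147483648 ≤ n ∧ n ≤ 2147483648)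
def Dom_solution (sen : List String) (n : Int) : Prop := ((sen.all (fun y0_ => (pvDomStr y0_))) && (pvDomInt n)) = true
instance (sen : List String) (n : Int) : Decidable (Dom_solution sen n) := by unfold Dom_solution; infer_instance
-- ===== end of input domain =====

-- B replaces A's per-character re-scan of every sentence for every key combination by a
-- precomputed per-sentence (requirement set, value) table and a subset test.
-- Return-value equivalence only; neither program mutates its arguments observably.

-- ===== PORT A =====

-- str.islower(): at least one cased character and no uppercase one (exact on ASCII)
def pyIslower (s : String) : Bool :=
  (s.toList.any (fun c => PySem.Chars.islower c || PySem.Chars.isupper c))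
    && !(s.toList.any PySem.Chars.isupper)

-- get_score's per-character loop; `score` is the running accumulator, early `return 0` kept
def getScoreGo (st : List String) (isshift : Int) : List Char → Int → Int
  | [], score => score
  | i :: rest, score =>
    let inc : Int :=
      if PySem.Chars.isupper i
          ∧ st.contains (String.ofList [PySem.Chars.lowerChar i]) ∧ isshift = 1 then 2 else 1
    if i ≠ ' ' then
      if PySem.Chars.isupper i then
        if isshift = 0 ∨ ¬ st.contains (String.ofList [PySem.Chars.lowerChar i]) then 0
        else getScoreGo st isshift rest (score + inc)
      else
        if ¬ st.contains (String.ofList [i]) then 0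
        else getScoreGo st isshift rest (score + inc)
    else getScoreGo st isshift rest (score + inc)

def getScore (s : String) (st : List String) : Int :=
  let isshift : Int := if st.contains "shift" then 1 else 0
  getScoreGo st isshift s.toList 0

def solution (sen : List String) (n : Int) : Int :=
  let p := sen.foldl (fun (p : Int × PySem.Set String) str =>
      let isshift := if pyIslower str = false then 1 else p.1
      let str2 := if pyIslower str = false then PySem.Str.lower str else str
      (isshift, PySem.Set.union p.2 (str2.toList.map (fun c => String.ofList [c]))))
    (0, PySem.Set.empty)
  let charSet := if p.1 = 1 then PySem.Set.add p.2 "shift" else p.2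
  -- char_set.remove(' '): KeyError when no sentence contains ' ' — excluded by Pre_solution
  let charSet := (PySem.Set.remove? charSet " ").getD []
  let comb := (PySem.List.pyRange 1 (n + 1) 1).foldl
      (fun acc i => acc ++ PySem.List.combinations charSet i.toNat) []
  comb.foldl (fun mx st =>
    let s := sen.foldl (fun s str => s + getScore str st) 0
    if s > mx then s else mx) 0

-- ===== PORT B =====

-- {c.lower() for c in s if c != ' '}, plus 'shift' if any character is uppercase
def reqOf (s : String) : PySem.Set String :=
  let base := PySem.Set.ofList
      ((s.toList.filter (fun c => c ≠ ' ')).map (fun c => String.ofList [PySem.Chars.lowerChar c]))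
  if s.toList.any PySem.Chars.isupper then PySem.Set.add base "shift" else base

-- len(s) + sum(c.isupper() for c in s)
def entryVal (s : String) : Int :=
  (s.toList.length : Int) + ((s.toList.countP PySem.Chars.isupper : Nat) : Int)

def solution_alt (sen : List String) (n : Int) : Int :=
  let shiftNeeded := sen.any (fun s => !(pyIslower s))
  let keys : PySem.Set String := sen.foldl
      (fun acc s => PySem.Set.union acc ((PySem.Str.lower s).toList.map (fun c => String.ofList [c])))
      PySem.Set.empty
  let keys := PySem.Set.discard keys " "
  let keys := if shiftNeeded then PySem.Set.add keys "shift" else keys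
  let table := sen.map (fun s => (reqOf s, entryVal s))
  (PySem.List.pyRange 1 (min n (keys.length : Int) + 1) 1).foldl (fun best r =>
    (PySem.List.combinations keys r.toNat).foldl (fun best comb =>
      let cs := PySem.Set.ofList comb
      let total := table.foldl (fun t p => if PySem.Set.issubset p.1 cs then t + p.2 else t) 0
      if total > best then total else best) best) 0

-- ===== PRECONDITION & SPEC =====
-- Pre_ excludes exactly the inputs where no sentence contains a space, on which A's
-- char_set.remove(' ') raises KeyError (A returns on every other input).
def Pre_solution (sen : List String) (n : Int) : Prop :=
  sen.any (fun s => s.toList.contains ' ') = true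
instance (sen : List String) (n : Int) : Decidable (Pre_solution sen n) := by
  unfold Pre_solution; infer_instance

def pvWitness_solution : List String × Int := (["aB c", "ca"], 2)

def Spec_solution (sen : List String) (n : Int) (out : Int) : Prop := out = solution_alt sen n
instance (sen : List String) (n : Int) (out : Int) : Decidable (Spec_solution sen n out) := by
  unfold Spec_solution; infer_instance

-- ===== CLAIM (what is proved, stated in full; the proofs are below) =====
def Claim_equal_solution : Prop := ∀ (sen : List String) (n : Int),
  Dom_solution sen n → Pre_solution sen n → Spec_solution sen n (solution sen n)

-- ===== LEMMAS AND PROOFS =====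

theorem lowerChar_of_not_upper (c : Char) (h : PySem.Chars.isupper c = false) :
    PySem.Chars.lowerChar c = c := by
  simp [PySem.Chars.lowerChar, h]

theorem set_contains_iff {s : PySem.Set String} {x : String} :
    PySem.Set.contains s x = true ↔ x ∈ s := by
  simp only [PySem.Set.contains]
  exact List.contains_iff_mem

-- the per-character success condition of get_score, as a predicate over the sentence
def okSen (st : List String) (cs : List Char) : Bool :=
  cs.all (fun c => c == ' ' ||
    (if PySem.Chars.isupper c then
        st.contains "shift" && st.contains (String.ofList [PySem.Chars.lowerChar c])
      else st.contains (String.ofList [c])))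

theorem getScoreGo_eq (st : List String) (isshift : Int)
    (his : isshift = if st.contains "shift" then 1 else 0) :
    ∀ (cs : List Char) (score : Int),
    getScoreGo st isshift cs score =
      if okSen st cs then score + (cs.length : Int) + ((cs.countP PySem.Chars.isupper : Nat) : Int)
      else 0 := by
  intro cs
  induction cs with
  | nil => intro score; simp [getScoreGo, okSen]
  | cons c rest ih =>
    intro score
    have hup_sp : PySem.Chars.isupper ' ' = false := by decide
    by_cases hsh : "shift" ∈ st
    · have his1 : isshift = 1 := by rw [his, if_pos (List.contains_iff_mem.2 hsh)]
      subst his1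
      by_cases hsp : c = ' '
      · subst hsp
        have hok : okSen st (' ' :: rest) = okSen st rest := by
          simp [okSen, List.all_cons]
        simp only [getScoreGo]
        rw [hok]
        simp [hup_sp, ih, List.countP_cons]
        try (split <;> push_cast <;> omega)
      · by_cases hu : PySem.Chars.isupper c = true
        · by_cases hlo : String.ofList [PySem.Chars.lowerChar c] ∈ st
          · have hok : okSen st (c :: rest) = okSen st rest := by
              simp [okSen, List.all_cons, hsp, hu, hsh, hlo]
            simp only [getScoreGo]
            rw [hok]
            simp [hsp, hu, hsh, hlo, ih, List.countP_cons]
            try (split <;> push_cast <;> omega)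
          · have hok : okSen st (c :: rest) = false := by
              simp [okSen, List.all_cons, hsp, hu, hlo]
            simp only [getScoreGo]
            rw [hok]
            simp [hsp, hu, hlo]
        · have hu' : PySem.Chars.isupper c = false := by simpa using hu
          by_cases hin : String.ofList [c] ∈ st
          · have hok : okSen st (c :: rest) = okSen st rest := by
              simp [okSen, List.all_cons, hsp, hu', hin]
            simp only [getScoreGo]
            rw [hok]
            simp [hsp, hu', hin, ih, List.countP_cons]
            try (split <;> push_cast <;> omega)
          · have hok : okSen st (c :: rest) = false := by
              simp [okSen, List.all_cons, hsp, hu', hin]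
            simp only [getScoreGo]
            rw [hok]
            simp [hsp, hu', hin]
    · have hsh' : st.contains "shift" = false := by
        rw [Bool.eq_false_iff]
        intro hc
        exact hsh (List.contains_iff_mem.1 hc)
      have hsh'' : ¬ (st.contains "shift" = true) := by
        intro hc
        rw [hc] at hsh'
        simp at hsh'
      have his0 : isshift = 0 := by rw [his, if_neg hsh'']
      subst his0
      by_cases hsp : c = ' '
      · subst hsp
        have hok : okSen st (' ' :: rest) = okSen st rest := by
          simp [okSen, List.all_cons]
        simp only [getScoreGo]
        rw [hok]
        simp [hup_sp, ih, List.countP_cons]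
        try (split <;> push_cast <;> omega)
      · by_cases hu : PySem.Chars.isupper c = true
        · have hok : okSen st (c :: rest) = false := by
            simp [okSen, List.all_cons, hsp, hu, hsh]
          simp only [getScoreGo]
          rw [hok]
          simp [hsp, hu]
        · have hu' : PySem.Chars.isupper c = false := by simpa using hu
          by_cases hin : String.ofList [c] ∈ st
          · have hok : okSen st (c :: rest) = okSen st rest := by
              simp [okSen, List.all_cons, hsp, hu', hin]
            simp only [getScoreGo]
            rw [hok]
            simp [hsp, hu', hin, ih, List.countP_cons]
            try (split <;> push_cast <;> omega)
          · have hok : okSen st (c :: rest) = false := by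
              simp [okSen, List.all_cons, hsp, hu', hin]
            simp only [getScoreGo]
            rw [hok]
            simp [hsp, hu', hin]

theorem ok_iff_subset (st : List String) (s : String) :
    PySem.Set.issubset (reqOf s) (PySem.Set.ofList st) = okSen st s.toList := by
  rw [Bool.eq_iff_iff]
  have hmem : ∀ x : String, PySem.Set.contains (PySem.Set.ofList st) x = true ↔ x ∈ st := by
    intro x
    rw [set_contains_iff]
    exact PySem.Set.mem_ofList _ _
  constructor
  · intro h
    simp only [okSen, List.all_eq_true]
    intro c hc
    by_cases hsp : c = ' '
    · simp [hsp]
    · have hbe : (c == ' ') = false := by simpa using hsp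
      simp only [hbe, Bool.false_or]
      rw [PySem.Set.issubset] at h
      simp only [List.all_eq_true] at h
      have hcmem : String.ofList [PySem.Chars.lowerChar c] ∈ reqOf s := by
        unfold reqOf
        have hb : String.ofList [PySem.Chars.lowerChar c] ∈
            PySem.Set.ofList ((s.toList.filter (fun c => c ≠ ' ')).map
              (fun c => String.ofList [PySem.Chars.lowerChar c])) := by
          rw [PySem.Set.mem_ofList]
          exact List.mem_map.2 ⟨c, List.mem_filter.2 ⟨hc, by simpa using hsp⟩, rfl⟩
        split
        · exact (PySem.Set.mem_add _ _ _).2 (Or.inl hb)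
        · exact hb
      have hlo := (hmem _).1 (h _ hcmem)
      by_cases hu : PySem.Chars.isupper c = true
      · have hshift : "shift" ∈ reqOf s := by
          unfold reqOf
          rw [if_pos (List.any_eq_true.2 ⟨c, hc, hu⟩)]
          exact (PySem.Set.mem_add _ _ _).2 (Or.inr rfl)
        have hsh := (hmem _).1 (h _ hshift)
        simp only [hu, if_true]
        simp
        exact ⟨hsh, hlo⟩
      · have hu' : PySem.Chars.isupper c = false := by simpa using hu
        rw [lowerChar_of_not_upper c hu'] at hlo
        simp only [hu', Bool.false_eq_true, if_false]
        simp
        exact hlo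
  · intro h
    rw [PySem.Set.issubset]
    simp only [List.all_eq_true]
    intro x hx
    rw [hmem]
    simp only [okSen, List.all_eq_true] at h
    unfold reqOf at hx
    have hbase : x ∈ PySem.Set.ofList ((s.toList.filter (fun c => c ≠ ' ')).map
        (fun c => String.ofList [PySem.Chars.lowerChar c])) → x ∈ st := by
      intro hb
      rw [PySem.Set.mem_ofList] at hb
      obtain ⟨c, hcf, rfl⟩ := List.mem_map.1 hb
      obtain ⟨hc, hcs⟩ := List.mem_filter.1 hcf
      have hbe : (c == ' ') = false := by simpa using hcs
      have hh := h c hc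
      simp only [hbe, Bool.false_or] at hh
      by_cases hu : PySem.Chars.isupper c = true
      · simp only [hu, if_true, Bool.and_eq_true] at hh
        simp at hh
        exact hh.2
      · have hu' : PySem.Chars.isupper c = false := by simpa using hu
        rw [lowerChar_of_not_upper c hu']
        simp only [hu', Bool.false_eq_true, if_false] at hh
        simpa using hh
    by_cases hany : s.toList.any PySem.Chars.isupper = true
    · rw [if_pos hany] at hx
      rcases (PySem.Set.mem_add _ _ _).1 hx with hb | rfl
      · exact hbase hb
      · obtain ⟨c, hc, hu⟩ := List.any_eq_true.1 hany
        have hcsp : c ≠ ' ' := by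
          intro hcc
          rw [hcc] at hu
          exact absurd hu (by decide)
        have hbe : (c == ' ') = false := by simpa using hcsp
        have hh := h c hc
        simp only [hbe, Bool.false_or, hu, if_true, Bool.and_eq_true] at hh
        simp at hh
        exact hh.1
    · rw [if_neg hany] at hx
      exact hbase hx

theorem getScore_eq (s : String) (st : List String) :
    getScore s st = if PySem.Set.issubset (reqOf s) (PySem.Set.ofList st) then entryVal s
      else 0 := by
  rw [ok_iff_subset]
  unfold getScore entryVal
  rw [getScoreGo_eq st _ rfl]
  split <;> [omega; rfl]

theorem lower_of_islower (s : String) (h : pyIslower s = true) :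
    (PySem.Str.lower s).toList = s.toList := by
  simp only [pyIslower, Bool.and_eq_true, Bool.not_eq_true', List.any_eq_false] at h
  simp only [PySem.Str.toList_lower, PySem.Chars.lower]
  calc List.map PySem.Chars.lowerChar s.toList
      = List.map id s.toList :=
        List.map_congr_left (fun c hc => lowerChar_of_not_upper c (by simpa using h.2 c hc))
    _ = s.toList := List.map_id _

theorem foldA_eq (sen : List String) : ∀ (b : Int) (cs : PySem.Set String),
    sen.foldl (fun (p : Int × PySem.Set String) str =>
      ((if pyIslower str = false then 1 else p.1),
        PySem.Set.union p.2
          ((if pyIslower str = false then PySem.Str.lower str else str).toList.map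
            (fun c => String.ofList [c])))) (b, cs)
    = ((if sen.any (fun s => !(pyIslower s)) then 1 else b),
       sen.foldl (fun acc s =>
         PySem.Set.union acc ((PySem.Str.lower s).toList.map (fun c => String.ofList [c]))) cs) := by
  induction sen with
  | nil => intro b cs; simp
  | cons s rest ih =>
    intro b cs
    by_cases h : pyIslower s = true
    · simp only [List.foldl_cons, List.any_cons, h, Bool.not_true, Bool.false_or,
        if_neg (by simp [h] : ¬ pyIslower s = false)]
      rw [lower_of_islower s h]
      exact ih b _
    · have h' : pyIslower s = false := by simpa using h
      simp only [List.foldl_cons, List.any_cons, h', Bool.not_false, Bool.true_or, if_true,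
        if_pos h']
      rw [ih]
      split <;> rfl

theorem mem_foldB (sen : List String) : ∀ (cs : PySem.Set String) (x : String),
    x ∈ cs →
    x ∈ sen.foldl (fun acc s =>
        PySem.Set.union acc ((PySem.Str.lower s).toList.map (fun c => String.ofList [c]))) cs := by
  induction sen with
  | nil => intro cs x hx; simpa using hx
  | cons s rest ih =>
    intro cs x hx
    exact ih _ x ((PySem.Set.mem_union _ _ _).2 (Or.inl hx))

theorem space_mem_foldB (sen : List String)
    (h : sen.any (fun s => s.toList.contains ' ') = true) : ∀ (cs : PySem.Set String),
    " " ∈ sen.foldl (fun acc s =>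
        PySem.Set.union acc ((PySem.Str.lower s).toList.map (fun c => String.ofList [c]))) cs := by
  induction sen with
  | nil => simp at h
  | cons s rest ih =>
    intro cs
    simp only [List.any_cons, Bool.or_eq_true] at h
    rcases h with hs | hr
    · simp only [List.foldl_cons]
      apply mem_foldB
      apply (PySem.Set.mem_union _ _ _).2
      right
      have hsp : ' ' ∈ s.toList := List.contains_iff_mem.1 hs
      have hmem : ' ' ∈ (PySem.Str.lower s).toList := by
        simp only [PySem.Str.toList_lower, PySem.Chars.lower]
        exact List.mem_map.2 ⟨' ', hsp, by decide⟩
      exact List.mem_map.2 ⟨' ', hmem, rfl⟩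
    · exact ih hr _

theorem shift_not_mem_foldB (sen : List String) : ∀ (cs : PySem.Set String),
    "shift" ∉ cs →
    "shift" ∉ sen.foldl (fun acc s =>
        PySem.Set.union acc ((PySem.Str.lower s).toList.map (fun c => String.ofList [c]))) cs := by
  induction sen with
  | nil => intro cs h; simpa using h
  | cons s rest ih =>
    intro cs h
    apply ih
    intro hmem
    rcases (PySem.Set.mem_union _ _ _).1 hmem with hl | hr
    · exact h hl
    · obtain ⟨c, _, hc⟩ := List.mem_map.1 hr
      have hl5 : "shift".toList = [c] := by rw [← hc]; simp
      simp at hl5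

theorem sentence_fold_eq (sen : List String) (st : List String) :
    sen.foldl (fun s str => s + getScore str st) 0 =
      (sen.map (fun s => (reqOf s, entryVal s))).foldl
        (fun t p => if PySem.Set.issubset p.1 (PySem.Set.ofList st) then t + p.2 else t) 0 := by
  rw [List.foldl_map]
  apply PySem.List.foldl_congr_mem
  intro acc s _
  rw [getScore_eq]
  split <;> simp

theorem pyRange_one_split (a b c : Int) (h1 : a ≤ b) (h2 : b ≤ c) :
    PySem.List.pyRange a c 1 = PySem.List.pyRange a b 1 ++ PySem.List.pyRange b c 1 := by
  rw [PySem.List.pyRange_one a c, PySem.List.pyRange_one a b, PySem.List.pyRange_one b c]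
  rw [show (c - a).toNat = (b - a).toNat + (c - b).toNat by omega]
  rw [List.range_add, List.map_append, List.map_map]
  congr 1
  apply List.map_congr_left
  intro k _
  simp only [Function.comp_apply]
  push_cast
  omega

theorem tail_fold_id {β : Type} [BEq β] (KK : List β) (g : Int → List β → Int) (lo hi : Int)
    (hlo : (KK.length : Int) < lo) (best : Int) :
    (PySem.List.pyRange lo hi 1).foldl
      (fun b r => (PySem.List.combinations KK r.toNat).foldl g b) best = best := by
  have h1 : (PySem.List.pyRange lo hi 1).foldl
      (fun b r => (PySem.List.combinations KK r.toNat).foldl g b) best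
      = (PySem.List.pyRange lo hi 1).foldl (fun (b : Int) (_ : Int) => b) best := by
    apply PySem.List.foldl_congr_mem
    intro b r hr
    have hmem := (PySem.List.mem_pyRange_one).1 hr
    have hnil : PySem.List.combinations KK r.toNat = [] := by
      apply PySem.List.combinations_eq_nil_of_length_lt
      omega
    rw [hnil]
    rfl
  rw [h1]
  exact PySem.List.foldl_ignore _ _

theorem flatMap_foldl {α β : Type} (L : List α) (g : α → List β) (f : Int → β → Int) :
    ∀ i : Int, (L.flatMap g).foldl f i = L.foldl (fun a x => (g x).foldl f a) i := by
  induction L with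
  | nil => intro i; simp
  | cons x rest ih => intro i; simp [List.flatMap_cons, List.foldl_append, ih]

-- ===== VERDICT (by name: the statement is the Claim_ definition above) =====
theorem solution_spec : Claim_equal_solution := by
  intro sen n _ hpre
  simp only [Spec_solution, solution, solution_alt]
  rw [foldA_eq]
  dsimp only
  unfold Pre_solution at hpre
  set K := sen.foldl (fun acc s =>
      PySem.Set.union acc ((PySem.Str.lower s).toList.map (fun c => String.ofList [c])))
      PySem.Set.empty with hK
  have hsp : " " ∈ K := space_mem_foldB sen hpre PySem.Set.empty
  have hsh : "shift" ∉ K := shift_not_mem_foldB sen PySem.Set.empty (by simp [PySem.Set.empty])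
  have hkeys :
      (PySem.Set.remove?
        (if (if sen.any (fun s => !(pyIslower s)) then (1:Int) else 0) = 1
          then PySem.Set.add K "shift" else K) " ").getD []
      = (if sen.any (fun s => !(pyIslower s))
          then PySem.Set.add (PySem.Set.discard K " ") "shift"
          else PySem.Set.discard K " ") := by
    by_cases hany : sen.any (fun s => !(pyIslower s)) = true
    · rw [hany, if_pos rfl, if_pos rfl, if_pos rfl]
      have hadd : PySem.Set.add K "shift" = K ++ ["shift"] := by
        simp only [PySem.Set.add]
        rw [if_neg (by rw [set_contains_iff]; exact hsh)]
      rw [hadd]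
      simp only [PySem.Set.remove?]
      rw [if_pos (by rw [set_contains_iff]; exact List.mem_append.2 (Or.inl hsp))]
      rw [Option.getD_some]
      simp only [PySem.Set.discard]
      rw [List.filter_append]
      simp only [PySem.Set.add]
      rw [if_neg (by
        rw [set_contains_iff]
        intro hx
        exact hsh (List.mem_of_mem_filter hx))]
      congr 1
    · have hany' : sen.any (fun s => !(pyIslower s)) = false := by simpa using hany
      rw [hany']
      simp [PySem.Set.remove?, PySem.Set.contains, hsp]
  rw [hkeys]
  set KK := (if sen.any (fun s => !(pyIslower s))
      then PySem.Set.add (PySem.Set.discard K " ") "shift"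
      else PySem.Set.discard K " ") with hKK
  rw [PySem.List.foldl_append_eq_flatMap, List.nil_append, flatMap_foldl]
  by_cases hn : n ≤ ((KK.length : Int))
  · rw [min_eq_left hn]
    apply PySem.List.foldl_congr_mem
    intro best r _
    apply PySem.List.foldl_congr_mem
    intro mx st _
    rw [sentence_fold_eq sen st]
  · rw [min_eq_right (by omega : ((KK.length : Int)) ≤ n)]
    rw [pyRange_one_split 1 ((KK.length : Int) + 1) (n + 1) (by omega) (by omega)]
    rw [List.foldl_append]
    rw [tail_fold_id _ _ _ _ (by omega)]
    apply PySem.List.foldl_congr_mem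
    intro best r _
    apply PySem.List.foldl_congr_mem
    intro mx st _
    rw [sentence_fold_eq sen st]
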